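-- pv_equiv track=rewrite | github.com/saskeli/seed_finding | huddinge_distance.py | max_alignment_score
-- ===== SOURCE A (Python) =====
-- def cmp(c1: str, c2: str, wildcard: str) -> bool:
-- 	if wildcard == c1:
-- 		return False
-- 	if wildcard == c2:
-- 		return False
-- 	return c1 == c2
--
-- def alignment_score(s1: str, s2: str, offset: int, wildcard: str) -> int:
-- 	retval = 0
-- 	if offset < 0:
-- 		assert -offset < len(s1)
-- 		limit = min(len(s1) + offset, len(s2))
-- 		for ii in range(0, limit):
-- 			retval += cmp(s1[ii - offset], s2[ii], wildcard)
-- 	else: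
-- 		assert offset < len(s1)
-- 		limit = min(len(s2) - offset, len(s1))
-- 		for ii in range(0, limit):
-- 			retval += cmp(s1[ii], s2[ii + offset], wildcard)
-- 	return retval
--
-- def max_alignment_score(s1: str, s2: str, wildcard: str) -> tuple[int, int]:
-- 	score = 0
-- 	offset = 0
-- 	ll = len(s1)
-- 	if 0 == ll:
-- 		return 0, 0
--
-- 	for ii in range(-ll + 1, ll):
-- 		current_score = alignment_score(s1, s2, ii, wildcard)
-- 		if score < current_score:
-- 			score = current_score
-- 			offset = ii
--
-- 	return score, offset
-- ===== SOURCE B (Python) =====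
-- def max_alignment_score(s1: str, s2: str, wildcard: str) -> tuple[int, int]:
-- 	n1 = len(s1)
-- 	if n1 == 0:
-- 		return 0, 0
-- 	# scatter: record the offset of every matching character pair once
-- 	offsets = []
-- 	for i, c in enumerate(s1):
-- 		if wildcard != c:
-- 			for j, c2 in enumerate(s2):
-- 				if c2 == c and -n1 < j - i < n1:
-- 					offsets.append(j - i)
-- 	counts = {}
-- 	for d in offsets:
-- 		counts[d] = counts.get(d, 0) + 1
-- 	score, offset = 0, 0
-- 	for d in range(-n1 + 1, n1):
-- 		v = counts.get(d, 0)
-- 		if score < v: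
-- 			score, offset = v, d
-- 	return score, offset
-- ===== Notes on version B (the rewrite author's own statement) =====
-- stated objective: alternative
-- what changed: Instead of recomputing an alignment score separately for every offset (per-offset gather), B makes one scatter pass over all character pairs, recording each match's offset once and counting them per offset in a dict, then scans the offset range in order for the first strict improvement.
import Mathlib
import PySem

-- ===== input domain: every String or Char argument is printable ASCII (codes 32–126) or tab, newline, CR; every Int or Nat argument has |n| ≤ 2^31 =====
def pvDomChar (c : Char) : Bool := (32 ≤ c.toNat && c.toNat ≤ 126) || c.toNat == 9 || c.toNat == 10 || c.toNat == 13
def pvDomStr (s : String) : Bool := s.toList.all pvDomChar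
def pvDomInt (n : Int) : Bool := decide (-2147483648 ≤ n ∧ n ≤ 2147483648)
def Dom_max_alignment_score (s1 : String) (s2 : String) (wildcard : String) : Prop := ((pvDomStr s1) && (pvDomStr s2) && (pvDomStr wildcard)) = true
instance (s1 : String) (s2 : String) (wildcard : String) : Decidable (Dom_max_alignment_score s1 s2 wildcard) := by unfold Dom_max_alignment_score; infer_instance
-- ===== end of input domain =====

-- B replaces A's per-offset rescanning by a single scatter pass: it collects the offset of
-- every matching character pair once, counts them per offset with a dict, and scans offsets in
-- order for the best score (objective: alternative; same worst-case cost, different algorithm).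

-- ===== PORT A =====
def pvCmp (c1 : Char) (c2 : Char) (w : String) : Bool :=
  if w.toList == [c1] then false
  else if w.toList == [c2] then false
  else c1 == c2

def pvAlign (s1 : String) (s2 : String) (offset : Int) (w : String) : Int :=
  let l1 := s1.toList
  let l2 := s2.toList
  if offset < 0 then
    let limit : Int := min ((l1.length : Int) + offset) (l2.length : Int)
    (PySem.List.pyRange 0 limit 1).foldl
      (fun r ii => r + (if pvCmp (PySem.List.pyGetD l1 (ii - offset) ' ') (PySem.List.pyGetD l2 ii ' ') w then 1 else 0)) 0
  else
    let limit : Int := min ((l2.length : Int) - offset) (l1.length : Int)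
    (PySem.List.pyRange 0 limit 1).foldl
      (fun r ii => r + (if pvCmp (PySem.List.pyGetD l1 ii ' ') (PySem.List.pyGetD l2 (ii + offset) ' ') w then 1 else 0)) 0

def max_alignment_score (s1 : String) (s2 : String) (wildcard : String) : Int × Int :=
  let ll : Int := s1.toList.length
  if 0 == ll then (0, 0)
  else
    (PySem.List.pyRange (-ll + 1) ll 1).foldl
      (fun (st : Int × Int) ii =>
        let current_score := pvAlign s1 s2 ii wildcard
        if st.1 < current_score then (current_score, ii) else st) (0, 0)

-- ===== PORT B =====
def max_alignment_score_alt (s1 : String) (s2 : String) (wildcard : String) : Int × Int :=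
  let l1 := s1.toList
  let l2 := s2.toList
  let n1 : Int := l1.length
  if n1 == 0 then (0, 0)
  else
    let offsets : List Int :=
      (PySem.List.enumerate l1).foldl (fun acc ic =>
        if wildcard.toList == [ic.2] then acc
        else
          (PySem.List.enumerate l2).foldl (fun acc2 jc =>
            if jc.2 == ic.2 && (-n1 < jc.1 - ic.1 && jc.1 - ic.1 < n1) then
              acc2 ++ [jc.1 - ic.1]
            else acc2) acc) []
    let counts : PySem.Dict Int Int :=
      offsets.foldl (fun d x => d.insert x (d.getD x 0 + 1)) PySem.Dict.empty
    (PySem.List.pyRange (-n1 + 1) n1 1).foldl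
      (fun (st : Int × Int) d =>
        let v := counts.getD d 0
        if st.1 < v then (v, d) else st) (0, 0)

-- ===== PRECONDITION & SPEC =====
def Spec_max_alignment_score (s1 : String) (s2 : String) (wildcard : String) (out : Int × Int) : Prop := out = max_alignment_score_alt s1 s2 wildcard
instance (s1 : String) (s2 : String) (wildcard : String) (out : Int × Int) : Decidable (Spec_max_alignment_score s1 s2 wildcard out) := by unfold Spec_max_alignment_score; infer_instance

-- ===== CLAIM (what is proved, stated in full; the proofs are below) =====
def Claim_equal_max_alignment_score : Prop := ∀ (s1 : String) (s2 : String) (wildcard : String), Dom_max_alignment_score s1 s2 wildcard → Spec_max_alignment_score s1 s2 wildcard (max_alignment_score s1 s2 wildcard)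

-- ===== LEMMAS AND PROOFS =====

-- canonical count of matching pairs at a given offset
def pvHit (l1 l2 : List Char) (w : String) (d : Int) (i : Nat) : Bool :=
  decide (0 ≤ (i : Int) + d) && decide ((i : Int) + d < (l2.length : Int)) &&
    (l2.getD ((i : Int) + d).toNat ' ' == l1.getD i ' ') && !(w.toList == [l1.getD i ' '])

def pvCnt (l1 l2 : List Char) (w : String) (d : Int) : Int :=
  ((List.range l1.length).countP (pvHit l1 l2 w d) : Int)

theorem pvCmp_eq (c1 c2 : Char) (w : String) :
    pvCmp c1 c2 w = ((c2 == c1) && !(w.toList == [c1])) := by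
  unfold pvCmp
  rcases eq_or_ne c1 c2 with h | h
  · subst h; by_cases hw : w.toList = [c1] <;> simp [hw]
  · simp only [beq_iff_eq]
    have : (c2 == c1) = false := by simp [Ne.symm h]
    simp [this, h]

theorem countP_range_extend (m n : Nat) (h : m ≤ n) (p : Nat → Bool)
    (hz : ∀ k, m ≤ k → k < n → p k = false) :
    (List.range n).countP p = (List.range m).countP p := by
  induction n, h using Nat.le_induction with
  | base => rfl
  | succ n hmn ih =>
    rw [List.range_succ, List.countP_append, ih (fun k hk hk2 => hz k hk (by omega))]
    simp [hz n hmn (by omega)]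

theorem pvAlign_eq_cnt (s1 s2 : String) (w : String) (d : Int)
    (h1 : -(s1.toList.length : Int) < d) (h2 : d < (s1.toList.length : Int)) :
    pvAlign s1 s2 d w = pvCnt s1.toList s2.toList w d := by
  unfold pvAlign pvCnt
  set l1 := s1.toList with hl1
  set l2 := s2.toList with hl2
  by_cases hd : d < 0
  · simp only [if_pos hd]
    rw [PySem.List.foldl_add]
    rw [PySem.List.sum_map_ite_one_zero]
    rw [PySem.List.pyRange_one]
    rw [List.countP_map]
    set m := (min ((l1.length : Int) + d) (l2.length : Int) - 0).toNat with hm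
    set e := (-d).toNat with he
    have hemn : e + m ≤ l1.length := by omega
    rw [countP_range_extend (e + m) l1.length hemn _ (by
      intro k hk hk2
      simp only [pvHit]
      have : ¬ ((k : Int) + d < (l2.length : Int)) ∨ ¬ (k < l1.length) := by omega
      rcases this with h | h
      · simp [h]
      · omega)]
    rw [List.range_add, List.countP_append, List.countP_map]
    have hz : (List.range e).countP (pvHit l1 l2 w d) = 0 := by
      apply List.countP_eq_zero.mpr
      intro k hk
      simp only [List.mem_range] at hk
      simp [pvHit]
      intro h; omega
    rw [hz]
    simp only [zero_add, Nat.cast_inj]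
    apply List.countP_congr
    intro k hk
    simp only [List.mem_range] at hk
    have hk2 : (k : Int) < (l2.length : Int) := by omega
    have hc1' : (k:Int) - d = ((e + k : Nat) : Int) := by push_cast; omega
    have hc2 : ((e + k : Nat) : Int) + d = (k : Int) := by push_cast; omega
    have hc3 : (0:Int) + (k:Int) = ((k : Nat) : Int) := by omega
    simp only [Function.comp, pvHit, hc2, pvCmp_eq, hc1', PySem.List.pyGetD_natCast,
      Int.toNat_natCast]
    simp [hk2]
  · simp only [if_neg hd]
    rw [PySem.List.foldl_add]
    rw [PySem.List.sum_map_ite_one_zero]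
    rw [PySem.List.pyRange_one]
    rw [List.countP_map]
    set m := (min ((l2.length : Int) - d) (l1.length : Int) - 0).toNat with hm
    have hmn : m ≤ l1.length := by omega
    rw [countP_range_extend m l1.length hmn _ (by
      intro k hk hk2
      simp only [pvHit]
      have : ¬ ((k : Int) + d < (l2.length : Int)) := by omega
      simp [this])]
    simp only [zero_add, Nat.cast_inj]
    apply List.countP_congr
    intro k hk
    simp only [List.mem_range] at hk
    have hk2 : (0:Int) ≤ (k : Int) + d := by omega
    have hk3 : (k : Int) + d < (l2.length : Int) := by omega
    have hc5' : (k:Int) + d = (((k + d.toNat : Nat)) : Int) := by push_cast; omega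
    simp only [pvHit, pvCmp_eq, hc5', Int.toNat_natCast]
    simp only [Function.comp]
    rw [hc5']
    simp only [PySem.List.pyGetD_natCast]
    simp
    omega

theorem count_flatMap {α β : Type} [BEq β] (l : List α) (g : α → List β) (d : β) :
    (l.flatMap g).count d = (l.map (fun x => (g x).count d)).sum := by
  induction l with
  | nil => simp
  | cons x xs ih => simp [List.flatMap_cons, List.count_append, ih]

theorem countP_nodup_single {α : Type} [BEq α] [LawfulBEq α] (l : List α) (hl : l.Nodup)
    (a : α) (q : α → Bool) :
    l.countP (fun x => (x == a) && q x) = if a ∈ l ∧ q a then 1 else 0 := by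
  induction l with
  | nil => simp
  | cons x xs ih =>
    rw [List.countP_cons]
    rcases List.nodup_cons.mp hl with ⟨hx, hxs⟩
    by_cases hxa : x = a
    · subst hxa
      rw [ih hxs]
      by_cases hq : q x = true
      · simp [hx, hq]
      · simp [hx, hq]
    · rw [ih hxs]
      simp [hxa, Ne.symm hxa]

theorem foldl_if_skip_append {α β : Type} (l : List α) (c : α → Bool) (g : α → List β) (init : List β) :
    l.foldl (fun acc x => if c x then acc else acc ++ g x) init
      = init ++ l.flatMap (fun x => if c x then [] else g x) := by
  induction l generalizing init with
  | nil => simp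
  | cons x xs ih => by_cases h : c x = true <;> simp [h, ih]

theorem offsets_count_eq_cnt (s1 s2 w : String) (d : Int)
    (h1 : -(s1.toList.length : Int) < d) (h2 : d < (s1.toList.length : Int)) :
    ((((PySem.List.enumerate s1.toList).foldl (fun acc ic =>
        if w.toList == [ic.2] then acc
        else
          (PySem.List.enumerate s2.toList).foldl (fun acc2 jc =>
            if jc.2 == ic.2 && (-(s1.toList.length : Int) < jc.1 - ic.1 && jc.1 - ic.1 < (s1.toList.length : Int)) then
              acc2 ++ [jc.1 - ic.1]
            else acc2) acc) []).count d : Nat) : Int) = pvCnt s1.toList s2.toList w d := by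
  set l1 := s1.toList with hl1
  set l2 := s2.toList with hl2
  set n1 : Int := (l1.length : Int) with hn1
  simp only [PySem.List.foldl_append_if]
  rw [foldl_if_skip_append]
  rw [List.nil_append, count_flatMap]
  rw [PySem.List.enumerate_eq_map_pyRange (xs := l1) (d := ' ')]
  rw [List.map_map]
  rw [PySem.List.pyRange_one (a := 0) (b := PySem.List.len l1)]
  rw [List.map_map]
  unfold pvCnt
  rw [← PySem.List.sum_map_ite_one_zero_nat (pvHit l1 l2 w d) (List.range l1.length)]
  have hlen : ((PySem.List.len l1) - 0).toNat = l1.length := by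
    simp [PySem.List.len_eq]
  rw [hlen]
  congr 1
  refine congrArg List.sum (List.map_congr_left ?_)
  intro i hi
  simp only [List.mem_range] at hi
  simp only [Function.comp_apply, zero_add, PySem.List.pyGetD_natCast]
  by_cases hw : w.toList = [l1[i]?.getD ' ']
  · rw [if_pos (by simp [hw])]
    simp [pvHit, List.getD, hw]
  · rw [if_neg (by simp [hw])]
    rw [List.count_eq_countP, List.countP_map, List.countP_filter]
    rw [PySem.List.enumerate_eq_map_pyRange (xs := l2) (d := ' '), List.countP_map]
    rw [List.countP_congr (q := fun j => (j == (i : Int) + d) &&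
        (PySem.List.pyGetD l2 j ' ' == l1[i]?.getD ' ')) (by
      intro j hj
      simp only [Function.comp_apply, Bool.and_eq_true, beq_iff_eq, decide_eq_true_eq]
      constructor
      · rintro ⟨hdd, hcc, hb1, hb2⟩
        exact ⟨by omega, hcc⟩
      · rintro ⟨hdd, hcc⟩
        exact ⟨by omega, hcc, by omega, by omega⟩)]
    rw [countP_nodup_single _ (PySem.List.nodup_pyRange_one 0 (PySem.List.len l2)) ((i:Int)+d)]
    simp only [PySem.List.mem_pyRange_one, pvHit]
    have hlen2 : PySem.List.len l2 = (l2.length : Int) := by simp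
    rw [hlen2]
    by_cases hb1 : 0 ≤ (i:Int) + d
    · by_cases hb2 : (i:Int) + d < (l2.length : Int)
      · have hlt : ((i:Int) + d).toNat < l2.length := by omega
        have hpy : PySem.List.pyGetD l2 ((i:Int) + d) ' ' = l2.getD ((i:Int)+d).toNat ' ' := by
          rw [PySem.List.pyGetD_eq_getElem l2 ' ' hb1 hb2, List.getD_eq_getElem l2 ' ' hlt]
        simp [hb1, hb2, hpy, hw, List.getD]
      · simp [hb1, hb2]
    · simp [hb1]


-- ===== VERDICT (by name: the statement is the Claim_ definition above) =====
theorem max_alignment_score_spec : Claim_equal_max_alignment_score := by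
  intro s1 s2 wildcard _
  unfold Spec_max_alignment_score max_alignment_score max_alignment_score_alt
  dsimp only
  by_cases h0 : (s1.toList.length : Int) = 0
  · rw [if_pos (by simpa using h0.symm), if_pos (by simpa using h0)]
  · rw [if_neg (by simpa using fun h => h0 h.symm), if_neg (by simpa using h0)]
    apply PySem.List.foldl_congr_mem
    intro st d hd
    rw [PySem.List.mem_pyRange_one] at hd
    have hd1 : -(s1.toList.length : Int) < d := by omega
    have hd2 : d < (s1.toList.length : Int) := by omega
    have hc : ((List.foldl (fun d x => d.insert x (d.getD x 0 + 1)) PySem.Dict.empty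
          (List.foldl
            (fun acc ic =>
              if wildcard.toList == [ic.2] then acc
              else
                List.foldl
                  (fun acc2 jc =>
                    if jc.2 == ic.2 && (decide (-(s1.toList.length : Int) < jc.1 - ic.1) && decide (jc.1 - ic.1 < (s1.toList.length : Int))) then
                      acc2 ++ [jc.1 - ic.1]
                    else acc2)
                  acc (PySem.List.enumerate s2.toList))
            [] (PySem.List.enumerate s1.toList))).getD d 0) = pvAlign s1 s2 d wildcard := by
      rw [PySem.Dict.getD_foldl_insert_add_one]
      rw [pvAlign_eq_cnt s1 s2 wildcard d hd1 hd2]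
      rw [← offsets_count_eq_cnt s1 s2 wildcard d hd1 hd2]
      simp
    rw [hc]
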